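-- pv_equiv track=rewrite | github.com/yasinkrc/BTK_PY | mini_tekrarlar/ters.py | kelime_ters_cevir
-- ===== SOURCE A (Python) =====
-- def kelime_ters_cevir(kelime):
--     ters_ceviri = {
--         'a': 'a',
--         'b': 'b',
--         'c': 'c',
--         'd': 'd',
--         'e': 'e',
--         'f': 'f',
--         'g': 'g',
--         'h': 'h',
--         'i': 'i',
--         'j': 'j',
--         'k': 'k',
--         'l': 'l',
--         'm': 'm',
--         'n': 'n',
--         'o': 'o',
--         'p': 'p',
--         'q': 'q',
--         'r': 'r',
--         's': 's',
--         't': 't',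
--         'u': 'u',
--         'v': 'v',
--         'w': 'w',
--         'x': 'x',
--         'y': 'y',
--         'z': 'z',
--     }
--
--     ters_kelime = ''
--     for harf in kelime:
--         ters_harf = ters_ceviri.get(harf, '')
--         ters_kelime = ters_harf + ters_kelime
--
--     return ters_kelime
-- ===== SOURCE B (Python) =====
-- def kelime_ters_cevir(kelime):
--     result = []
--     for harf in reversed(kelime):
--         if 'a' <= harf <= 'z':
--             result.append(harf)
--     return ''.join(result)
-- ===== Notes on version B (the rewrite author's own statement) =====
-- stated objective: faster
-- what changed: Replaces the forward scan that prepends to a string via a 26-entry identity dict with a backward scan over the reversed input that range-tests for lowercase ASCII letters, appends matches to a list and joins once.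
import Mathlib
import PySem

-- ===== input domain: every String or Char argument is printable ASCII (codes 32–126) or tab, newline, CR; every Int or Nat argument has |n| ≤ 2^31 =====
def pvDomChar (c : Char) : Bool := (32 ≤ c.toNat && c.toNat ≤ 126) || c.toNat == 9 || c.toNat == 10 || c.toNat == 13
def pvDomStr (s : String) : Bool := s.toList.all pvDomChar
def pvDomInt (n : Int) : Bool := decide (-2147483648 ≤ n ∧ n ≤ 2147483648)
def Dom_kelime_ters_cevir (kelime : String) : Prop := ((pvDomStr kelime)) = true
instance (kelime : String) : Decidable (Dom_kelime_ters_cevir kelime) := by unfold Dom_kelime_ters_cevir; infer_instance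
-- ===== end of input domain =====

-- B replaces A's dict-lookup-and-string-prepend forward scan by a backward scan that
-- appends range-tested characters to a list and joins once (idiomatic; same results).

-- ===== PORT A =====
-- Python 1-char strings are ported as List Char (exact on the ASCII domain); the string
-- accumulation ters_harf + ters_kelime is List Char append, String.mk at the end.
def tersCeviri : PySem.Dict Char (List Char) := PySem.Dict.ofList
  [('a',['a']),('b',['b']),('c',['c']),('d',['d']),('e',['e']),('f',['f']),('g',['g']),
   ('h',['h']),('i',['i']),('j',['j']),('k',['k']),('l',['l']),('m',['m']),('n',['n']),
   ('o',['o']),('p',['p']),('q',['q']),('r',['r']),('s',['s']),('t',['t']),('u',['u']),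
   ('v',['v']),('w',['w']),('x',['x']),('y',['y']),('z',['z'])]

def kelime_ters_cevir (kelime : String) : String :=
  String.mk (kelime.toList.foldl
    (fun ters_kelime harf => (tersCeviri.getD harf []) ++ ters_kelime) [])

-- ===== PORT B =====
def kelime_ters_cevir_alt (kelime : String) : String :=
  String.mk (kelime.toList.reverse.foldl
    (fun result c => if 'a' ≤ c ∧ c ≤ 'z' then result ++ [c] else result) [])

-- ===== PRECONDITION & SPEC =====
def Spec_kelime_ters_cevir (kelime : String) (out : String) : Prop := out = kelime_ters_cevir_alt kelime
instance (kelime : String) (out : String) : Decidable (Spec_kelime_ters_cevir kelime out) := by unfold Spec_kelime_ters_cevir; infer_instance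

-- ===== CLAIM (what is proved, stated in full; the proofs are below) =====
def Claim_equal_kelime_ters_cevir : Prop := ∀ (kelime : String), Dom_kelime_ters_cevir kelime → Spec_kelime_ters_cevir kelime (kelime_ters_cevir kelime)

-- ===== LEMMAS AND PROOFS =====

-- The 26-entry identity dict, characterised on ASCII codes < 128.
set_option maxRecDepth 4000 in
theorem getD_tersCeviri_lt : ∀ n : Nat, n < 128 →
    tersCeviri.getD (Char.ofNat n) [] =
      if 'a' ≤ Char.ofNat n ∧ Char.ofNat n ≤ 'z' then [Char.ofNat n] else [] := by
  decide

theorem getD_tersCeviri (c : Char) (h : c.toNat < 128) :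
    tersCeviri.getD c [] = if 'a' ≤ c ∧ c ≤ 'z' then [c] else [] := by
  have := getD_tersCeviri_lt c.toNat h
  rwa [Char.ofNat_toNat] at this

def pvLower (c : Char) : Bool := decide ('a' ≤ c ∧ c ≤ 'z')

theorem foldA_eq (l : List Char) (acc : List Char)
    (h : ∀ c ∈ l, c.toNat < 128) :
    l.foldl (fun ters_kelime harf => (tersCeviri.getD harf []) ++ ters_kelime) acc
      = (l.filter pvLower).reverse ++ acc := by
  induction l generalizing acc with
  | nil => simp
  | cons c l ih =>
    simp only [List.foldl_cons, List.filter_cons]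
    rw [ih _ (fun x hx => h x (List.mem_cons_of_mem _ hx)),
        getD_tersCeviri c (h c (List.mem_cons_self))]
    by_cases hc : 'a' ≤ c ∧ c ≤ 'z' <;> simp [pvLower, hc]

theorem foldB_eq (l : List Char) (acc : List Char) :
    l.foldl (fun result c => if 'a' ≤ c ∧ c ≤ 'z' then result ++ [c] else result) acc
      = acc ++ l.filter pvLower := by
  induction l generalizing acc with
  | nil => simp
  | cons c l ih =>
    simp only [List.foldl_cons, List.filter_cons]
    rw [ih]
    by_cases hc : 'a' ≤ c ∧ c ≤ 'z' <;> simp [pvLower, hc]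

-- ===== VERDICT (by name: the statement is the Claim_ definition above) =====
theorem kelime_ters_cevir_spec : Claim_equal_kelime_ters_cevir := by
  intro kelime hdom
  unfold Spec_kelime_ters_cevir kelime_ters_cevir kelime_ters_cevir_alt
  have hlt : ∀ c ∈ kelime.toList, c.toNat < 128 := by
    intro c hc
    have := List.all_eq_true.mp hdom c hc
    simp only [pvDomChar, Bool.or_eq_true, Bool.and_eq_true, decide_eq_true_eq,
      beq_iff_eq] at this
    omega
  rw [foldA_eq _ _ hlt, foldB_eq, List.filter_reverse]
  simp
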